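-- pv_equiv track=rewrite | github.com/algorithm-studyy/algorithm | jiwon/programmers/python/defense_game.py | solution
-- ===== SOURCE A (Python) =====
-- from heapq import heappush, heappop
--
-- def solution(n, k, enemy):
--     answer = 0
--     if len(enemy) <= k or sum(enemy) <= n:
--         return len(enemy)
--     heap = []
--     for e in enemy:
--         heappush(heap, (-e, e))
--         n -= e
--         if n < 0 and k <= 0:
--             break
--         while heap and n < 0 < k:
--             n += heappop(heap)[1]
--             k -= 1
--         answer += 1
--     return answer
-- ===== SOURCE B (Python) =====
-- from heapq import heappush, heappop
--
-- def solution(n, k, enemy):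
--     # Bounded min-heap of the at-most-k waves currently skipped for free;
--     # when it overflows, the smallest candidate wave must be paid for.
--     if len(enemy) <= k or sum(enemy) <= n:
--         return len(enemy)
--     heap = []
--     for i, e in enumerate(enemy):
--         heappush(heap, e)
--         if len(heap) > k:
--             n -= heappop(heap)
--             if n < 0:
--                 return i
--     return len(enemy)
-- ===== Notes on version B (the rewrite author's own statement) =====
-- stated objective: simpler
-- what changed: Replaces A's unbounded max-heap of (-e,e) pairs with inner refund while-loop by a bounded min-heap of at most k freely-skipped waves: one push and at most one pop per round, paying for the smallest overflowing wave, returning the index at the first deficit.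
-- outside the precondition, e.g. on solution(1, 1, [2, -4, 6]): A returns 2, B returns 3
import Mathlib
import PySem

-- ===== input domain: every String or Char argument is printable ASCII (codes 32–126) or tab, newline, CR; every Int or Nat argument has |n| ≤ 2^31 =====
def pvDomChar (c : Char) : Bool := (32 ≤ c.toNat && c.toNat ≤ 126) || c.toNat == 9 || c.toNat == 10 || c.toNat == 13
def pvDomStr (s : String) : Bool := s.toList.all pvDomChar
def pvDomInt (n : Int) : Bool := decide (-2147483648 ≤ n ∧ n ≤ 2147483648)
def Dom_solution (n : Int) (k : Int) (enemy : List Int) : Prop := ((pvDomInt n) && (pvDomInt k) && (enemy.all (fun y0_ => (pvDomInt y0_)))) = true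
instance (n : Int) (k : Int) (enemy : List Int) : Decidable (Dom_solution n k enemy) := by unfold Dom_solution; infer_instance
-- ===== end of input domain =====

-- B replaces A's unbounded max-heap + inner refund while-loop by a bounded min-heap of the
-- at-most-k freely skipped waves with one pop per round (objective: simpler).


-- ===== PORT A =====
-- heapq is modelled by its observable behaviour on this use: the heap is the list of its
-- elements, heappop removes and returns one minimal element.  A's heap holds pairs (-e, e),
-- whose minimum is the pair with maximal e (equal pairs are identical values), so A's
-- heap is the list of the e's and its heappop returns a maximal e.  This model is exact.
def popGreatest (x : Int) (xs : List Int) : Int × List Int :=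
  ((xs.foldl max x), (x :: xs).erase (xs.foldl max x))

-- needed by `refund`'s termination proof (cited in its decreasing_by)
theorem foldl_max_mem (x : Int) (xs : List Int) : xs.foldl max x ∈ x :: xs := by
  induction xs generalizing x with
  | nil => simp
  | cons y ys ih =>
    simp only [List.foldl_cons]
    have h := ih (max x y)
    rw [List.mem_cons] at h
    rcases h with h | h
    · rw [h]; rcases max_choice x y with hxy | hxy <;> simp [hxy]
    · simp [h]

-- the inner `while heap and n < 0 < k:` refund loop of A
def refund (n k : Int) : List Int → Int × Int × List Int
  | [] => (n, k, [])
  | x :: xs =>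
    if n < 0 ∧ 0 < k then
      refund (n + (popGreatest x xs).1) (k - 1) (popGreatest x xs).2
    else (n, k, x :: xs)
termination_by l => l.length
decreasing_by
  simp only [popGreatest]
  have := List.length_erase_of_mem (foldl_max_mem x xs)
  simp only [List.length_cons] at this ⊢
  omega

-- the `for e in enemy:` loop of A (answer accumulator; break returns answer)
def aloop (n k : Int) (heap : List Int) (answer : Int) : List Int → Int
  | [] => answer
  | e :: rest =>
    if n - e < 0 ∧ k ≤ 0 then answer
    else
      aloop (refund (n - e) k (e :: heap)).1 (refund (n - e) k (e :: heap)).2.1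
            (refund (n - e) k (e :: heap)).2.2 (answer + 1) rest

def solution (n : Int) (k : Int) (enemy : List Int) : Int :=
  if (enemy.length : Int) ≤ k ∨ enemy.sum ≤ n then (enemy.length : Int)
  else aloop n k [] 0 enemy

-- ===== PORT B =====
-- B's min-heap is modelled the same way: list of elements, heappop removes one minimal element.
def popLeast (x : Int) (xs : List Int) : Int × List Int :=
  ((xs.foldl min x), (x :: xs).erase (xs.foldl min x))

-- the `for i, e in enumerate(enemy):` loop of B; at normal loop exit i = len(enemy)
def bloop (n k : Int) (heap : List Int) (i : Int) : List Int → Int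
  | [] => i
  | e :: rest =>
    if k < ((e :: heap).length : Int) then
      if n - (popLeast e heap).1 < 0 then i
      else bloop (n - (popLeast e heap).1) k (popLeast e heap).2 (i + 1) rest
    else bloop n k (e :: heap) (i + 1) rest

def solution_alt (n : Int) (k : Int) (enemy : List Int) : Int :=
  if (enemy.length : Int) ≤ k ∨ enemy.sum ≤ n then (enemy.length : Int)
  else bloop n k [] 0 enemy

-- ===== PRECONDITION & SPEC =====
-- Pre_ is the defense game's natural domain (a list of nonnegative wave sizes, any n and k)
-- together with the degenerate cases where the wave values cannot matter (k ≤ 0, or the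
-- guard len(enemy) ≤ k or sum(enemy) ≤ n fires); outside it — a negative wave reached with
-- 0 < k < len(enemy) — A's greedy refund returns accidental values (see cites) that B does
-- not reproduce.
def Pre_solution (n : Int) (k : Int) (enemy : List Int) : Prop :=
  (∀ e ∈ enemy, 0 ≤ e) ∨ k ≤ 0 ∨ (enemy.length : Int) ≤ k ∨ enemy.sum ≤ n
instance (n : Int) (k : Int) (enemy : List Int) : Decidable (Pre_solution n k enemy) := by
  unfold Pre_solution; infer_instance

def pvWitness_solution : Int × Int × List Int := (10, 1, [3, 5, 2, 9])

def Spec_solution (n : Int) (k : Int) (enemy : List Int) (out : Int) : Prop := out = solution_alt n k enemy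
instance (n : Int) (k : Int) (enemy : List Int) (out : Int) : Decidable (Spec_solution n k enemy out) := by unfold Spec_solution; infer_instance

-- ===== CLAIM (what is proved, stated in full; the proofs are below) =====
def Claim_equal_solution : Prop := ∀ (n : Int) (k : Int) (enemy : List Int), Dom_solution n k enemy → Pre_solution n k enemy → Spec_solution n k enemy (solution n k enemy)

-- ===== LEMMAS AND PROOFS =====

-- ---- extrema of nonempty lists via foldl ----

theorem le_foldl_max_of_mem {x y : Int} {xs : List Int} (h : y ∈ x :: xs) :
    y ≤ xs.foldl max x := by
  rcases List.mem_cons.mp h with h | h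
  · exact h ▸ (PySem.List.le_foldl_max xs x).1
  · exact (PySem.List.le_foldl_max xs x).2 y h

theorem foldl_min_mem (x : Int) (xs : List Int) : xs.foldl min x ∈ x :: xs := by
  induction xs generalizing x with
  | nil => simp
  | cons y ys ih =>
    simp only [List.foldl_cons]
    have h := ih (min x y)
    rw [List.mem_cons] at h
    rcases h with h | h
    · rw [h]; rcases min_choice x y with hxy | hxy <;> simp [hxy]
    · simp [h]

theorem foldl_min_le (xs : List Int) (a : Int) :
    xs.foldl min a ≤ a ∧ ∀ y ∈ xs, xs.foldl min a ≤ y := by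
  induction xs generalizing a with
  | nil => simp
  | cons z zs ih =>
    simp only [List.foldl_cons]
    obtain ⟨h1, h2⟩ := ih (min a z)
    refine ⟨le_trans h1 (min_le_left _ _), ?_⟩
    intro y hy
    rcases List.mem_cons.mp hy with rfl | hy
    · exact le_trans h1 (min_le_right _ _)
    · exact h2 y hy

theorem foldl_min_le_of_mem {x y : Int} {xs : List Int} (h : y ∈ x :: xs) :
    xs.foldl min x ≤ y := by
  rcases List.mem_cons.mp h with h | h
  · exact h ▸ (foldl_min_le xs x).1
  · exact (foldl_min_le xs x).2 y h

theorem foldl_max_eq_of_perm {x y : Int} {xs ys : List Int}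
    (h : (x :: xs).Perm (y :: ys)) : xs.foldl max x = ys.foldl max y := by
  apply le_antisymm
  · exact le_foldl_max_of_mem (h.mem_iff.mp (foldl_max_mem x xs))
  · exact le_foldl_max_of_mem (h.mem_iff.mpr (foldl_max_mem y ys))

theorem foldl_min_eq_of_perm {x y : Int} {xs ys : List Int}
    (h : (x :: xs).Perm (y :: ys)) : xs.foldl min x = ys.foldl min y := by
  apply le_antisymm
  · exact foldl_min_le_of_mem (h.mem_iff.mpr (foldl_min_mem y ys))
  · exact foldl_min_le_of_mem (h.mem_iff.mp (foldl_min_mem x xs))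

theorem popGreatest_perm (x : Int) (xs : List Int) :
    (x :: xs).Perm ((popGreatest x xs).1 :: (popGreatest x xs).2) :=
  List.perm_cons_erase (foldl_max_mem x xs)

-- ---- unfolding equations for refund ----

theorem refund_nil (n k : Int) : refund n k [] = (n, k, []) := by simp [refund]

theorem refund_cons_pos {n k : Int} (x : Int) (xs : List Int) (h : n < 0 ∧ 0 < k) :
    refund n k (x :: xs) =
      refund (n + (popGreatest x xs).1) (k - 1) (popGreatest x xs).2 := by
  rw [refund, if_pos h]

theorem refund_cons_neg {n k : Int} (x : Int) (xs : List Int) (h : ¬(n < 0 ∧ 0 < k)) :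
    refund n k (x :: xs) = (n, k, x :: xs) := by
  rw [refund, if_neg h]

-- ---- the full characterisation of the refund loop ----

theorem refund_spec (l : List Int) (n k : Int) : 0 ≤ k →
    ∃ P H', refund n k l = (n + P.sum, k - P.length, H') ∧
      (P ++ H').Perm l ∧
      (∀ x ∈ H', ∀ y ∈ P, x ≤ y) ∧
      (∀ y ∈ P, n + P.sum < y) ∧
      ((P.length : Int) ≤ k) ∧
      (0 ≤ n → P = [] ∧ H' = l) ∧
      (l ≠ [] → n < 0 → 0 < k → P ≠ []) ∧
      ((∀ x ∈ l, 0 ≤ x) → P ≠ [] → ∀ x ∈ l, x ≤ P.sum) := by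
  fun_induction refund n k l with
  | case1 n k =>
    intro hk
    exact ⟨[], [], by simp, by simp, by simp, by simp, by simpa using hk,
      by simp, by simp, by simp⟩
  | case2 n k x xs hc ih =>
    intro hk
    obtain ⟨P', H', heq, hperm, hdom, hlt, hlen, hzero, hne, hbound⟩ := ih (by omega)
    set m := (popGreatest x xs).1 with hm
    set t := (popGreatest x xs).2 with ht
    have hpg : (x :: xs).Perm (m :: t) := popGreatest_perm x xs
    have hmax : ∀ y ∈ x :: xs, y ≤ m := fun y hy => le_foldl_max_of_mem hy
    -- membership transfer: anything in P' or H' is in x :: xs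
    have hsub : ∀ z, z ∈ P' ++ H' → z ∈ x :: xs := by
      intro z hz
      have : z ∈ m :: t := List.mem_cons_of_mem m (hperm.mem_iff.mp hz)
      exact hpg.mem_iff.mpr this
    refine ⟨m :: P', H', ?_, ?_, ?_, ?_, ?_, ?_, ?_, ?_⟩
    · rw [heq]
      simp only [List.sum_cons, List.length_cons, Prod.mk.injEq]
      push_cast
      refine ⟨by ring, by ring, trivial⟩
    · exact (hperm.cons m).trans hpg.symm
    · intro a ha y hy
      rcases List.mem_cons.mp hy with rfl | hy
      · exact hmax a (hsub a (List.mem_append_right _ ha))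
      · exact hdom a ha y hy
    · intro y hy
      have hsum : n + (m :: P').sum = n + m + P'.sum := by simp; ring
      rcases List.mem_cons.mp hy with rfl | hy
      · -- n + m + P'.sum < m, i.e. n + P'.sum < 0
        rw [hsum]
        rcases eq_or_ne P' ([] : List Int) with rfl | hP'
        · simpa using hc.1
        · obtain ⟨p, hp⟩ := List.exists_mem_of_ne_nil P' hP'
          have h1 := hlt p hp
          have h2 : p ≤ m := hmax p (hsub p (List.mem_append_left _ hp))
          omega
      · rw [hsum]; exact hlt y hy
    · simp only [List.length_cons]
      push_cast
      omega
    · intro hn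
      exact absurd hc.1 (by omega)
    · intro _ _ _
      simp
    · intro hnn _ z hz
      have hzm := hmax z hz
      have hP'nn : 0 ≤ P'.sum := by
        apply List.sum_nonneg
        intro p hp
        exact hnn p (hsub p (List.mem_append_left _ hp))
      simp only [List.sum_cons]
      omega
  | case3 n k x xs hc =>
    intro hk
    refine ⟨[], x :: xs, by simp, by simp, by simp, by simp,
      by simpa using hk, by simp, ?_, by simp⟩
    intro _ hn hkpos
    exact absurd ⟨hn, hkpos⟩ hc

-- ---- permutation congruence of the loops ----

theorem refund_perm (n k : Int) {l : List Int} : ∀ {l' : List Int}, l.Perm l' →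
    (refund n k l).1 = (refund n k l').1 ∧ (refund n k l).2.1 = (refund n k l').2.1 ∧
      (refund n k l).2.2.Perm (refund n k l').2.2 := by
  fun_induction refund n k l with
  | case1 n k =>
    intro l' h
    have : l' = [] := h.symm.eq_nil
    subst this
    rw [refund_nil]
    exact ⟨rfl, rfl, List.Perm.refl _⟩
  | case2 n k x xs hc ih =>
    intro l' h
    obtain ⟨y, ys, rfl⟩ : ∃ y ys, l' = y :: ys := by
      cases l' with
      | nil => exact absurd h.eq_nil (by simp)
      | cons y ys => exact ⟨y, ys, rfl⟩
    rw [refund_cons_pos y ys hc]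
    have hmax : (popGreatest x xs).1 = (popGreatest y ys).1 := foldl_max_eq_of_perm h
    have herase : (popGreatest x xs).2.Perm (popGreatest y ys).2 := by
      simp only [popGreatest]
      rw [foldl_max_eq_of_perm h]
      exact h.erase _
    rw [← hmax]
    exact ih herase
  | case3 n k x xs hc =>
    intro l' h
    obtain ⟨y, ys, rfl⟩ : ∃ y ys, l' = y :: ys := by
      cases l' with
      | nil => exact absurd h.eq_nil (by simp)
      | cons y ys => exact ⟨y, ys, rfl⟩
    rw [refund_cons_neg y ys hc]
    exact ⟨rfl, rfl, h⟩

theorem aloop_perm (rest : List Int) : ∀ (n k ans : Int) {h h' : List Int}, h.Perm h' →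
    aloop n k h ans rest = aloop n k h' ans rest := by
  induction rest with
  | nil => intro n k ans h h' hp; rfl
  | cons e rest ih =>
    intro n k ans h h' hp
    simp only [aloop]
    split_ifs with hb
    · rfl
    · obtain ⟨h1, h2, h3⟩ := refund_perm (n - e) k (hp.cons e)
      rw [h1, h2]
      exact ih _ _ _ h3

theorem bloop_perm (rest : List Int) : ∀ (n k i : Int) {h h' : List Int}, h.Perm h' →
    bloop n k h i rest = bloop n k h' i rest := by
  induction rest with
  | nil => intro n k i h h' hp; rfl
  | cons e rest ih =>
    intro n k i h h' hp
    simp only [bloop]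
    have hlen : (e :: h).length = (e :: h').length := (hp.cons e).length_eq
    have hmin : (popLeast e h).1 = (popLeast e h').1 := foldl_min_eq_of_perm (hp.cons e)
    have herase : (popLeast e h).2.Perm (popLeast e h').2 := by
      simp only [popLeast]
      rw [foldl_min_eq_of_perm (hp.cons e)]
      exact (hp.cons e).erase _
    rw [hlen, hmin]
    split_ifs with hb1 hb2
    · rfl
    · exact ih _ _ _ herase
    · exact ih _ _ _ (hp.cons e)

-- ---- the core multiset step: pops plus the new payment fit inside B's surplus + e ----

theorem countP_mono_mem (s : Multiset Int) (p q : Int → Prop) [DecidablePred p]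
    [DecidablePred q] (h : ∀ a ∈ s, p a → q a) : s.countP p ≤ s.countP q := by
  induction s using Multiset.induction_on with
  | empty => simp
  | cons a t ih =>
    simp only [Multiset.countP_cons]
    have := ih (fun x hx hp => h x (Multiset.mem_cons_of_mem hx) hp)
    by_cases hp : p a
    · have hq : q a := h a (Multiset.mem_cons_self a t) hp
      simp only [hp, hq, if_pos]
      omega
    · simp only [hp, if_false]
      split_ifs <;> omega

theorem core_step (paid Y0 P H2 : Multiset Int) (e s : Int)
    (heq : paid + (e ::ₘ Y0) = P + H2)
    (hpaid : ∀ x ∈ paid, ∀ y ∈ Y0, x ≤ y)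
    (hdom : ∀ x ∈ H2, ∀ y ∈ P, x ≤ y)
    (hcard : P.card ≤ Y0.card)
    (hsmem : s ∈ e ::ₘ Y0)
    (hsmin : ∀ y ∈ e ::ₘ Y0, s ≤ y) :
    P + {s} ≤ e ::ₘ Y0 := by
  have step1 : P ≤ e ::ₘ Y0 := by
    rw [Multiset.le_iff_count]
    by_contra hco
    push Not at hco
    obtain ⟨v, hv⟩ := hco
    have hvP : v ∈ P := by rw [← Multiset.count_pos]; omega
    have hcounts : paid.count v + (e ::ₘ Y0).count v = P.count v + H2.count v := by
      have h0 := congrArg (Multiset.count v) heq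
      simp only [Multiset.count_add, Multiset.count_cons] at h0 ⊢
      omega
    have hvpaid : v ∈ paid := by rw [← Multiset.count_pos]; omega
    have hY0ge : ∀ w ∈ Y0, v ≤ w := hpaid v hvpaid
    have hH2le : ∀ w ∈ H2, w ≤ v := fun w hw => hdom w hw v hvP
    have hH2p : H2.countP (v < ·) = 0 :=
      Multiset.countP_eq_zero.mpr (fun a ha => not_lt.mpr (hH2le a ha))
    have hXp : paid.countP (v < ·) + (e ::ₘ Y0).countP (v < ·) =
        P.countP (v < ·) + H2.countP (v < ·) := by
      have h0 := congrArg (Multiset.countP (v < ·)) heq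
      simp only [Multiset.countP_add, Multiset.countP_cons] at h0 ⊢
      omega
    have hY0p_le : Y0.countP (v < ·) ≤ (e ::ₘ Y0).countP (v < ·) :=
      Multiset.countP_le_of_le _ (Multiset.le_cons_self Y0 e)
    have hPcard : P.countP (v < ·) + P.count v ≤ P.card := by
      have h1 : P.count v ≤ P.countP (fun w => ¬ v < w) := by
        have hcv : P.count v = P.countP (v = ·) := rfl
        rw [hcv]
        exact countP_mono_mem P _ _ (fun a _ hva => by omega)
      have h2 := Multiset.card_eq_countP_add_countP (v < ·) P
      omega
    have hY0card : Y0.card ≤ Y0.countP (v < ·) + Y0.count v := by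
      have h1 : Y0.countP (fun w => ¬ v < w) ≤ Y0.count v := by
        have hcv : Y0.count v = Y0.countP (v = ·) := rfl
        rw [hcv]
        exact countP_mono_mem Y0 _ _ (fun a ha hnlt => by
          have := hY0ge a ha; omega)
      have h2 := Multiset.card_eq_countP_add_countP (v < ·) Y0
      omega
    have hYv : Y0.count v ≤ (e ::ₘ Y0).count v :=
      Multiset.count_le_of_le v (Multiset.le_cons_self Y0 e)
    omega
  have step1c := Multiset.le_iff_count.mp step1
  rw [Multiset.le_iff_count]
  intro v
  by_cases hvs : v = s
  · subst hvs
    simp only [Multiset.count_add, Multiset.count_singleton_self]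
    rcases Nat.lt_or_ge (P.count v) ((e ::ₘ Y0).count v) with h | h
    · omega
    · exfalso
      have hceq : P.count v = (e ::ₘ Y0).count v := le_antisymm (step1c v) h
      have hvY : 1 ≤ (e ::ₘ Y0).count v := Multiset.count_pos.mpr hsmem
      have hvP : v ∈ P := by rw [← Multiset.count_pos]; omega
      have hYP : (e ::ₘ Y0) - P ≤ H2 := by
        rw [tsub_le_iff_left]
        calc (e ::ₘ Y0) ≤ paid + (e ::ₘ Y0) := Multiset.le_add_left _ _
          _ = P + H2 := heq
      have hsub_card : ((e ::ₘ Y0) - P).card = (e ::ₘ Y0).card - P.card :=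
        Multiset.card_sub step1
      have hcardlt : P.card < (e ::ₘ Y0).card := by
        have := Multiset.card_cons e Y0
        omega
      have hpos : 0 < ((e ::ₘ Y0) - P).card := by omega
      obtain ⟨w, hw⟩ := Multiset.card_pos_iff_exists_mem.mp hpos
      have hwH2 : w ∈ H2 := Multiset.mem_of_le hYP hw
      have hwY : w ∈ e ::ₘ Y0 := Multiset.mem_of_le tsub_le_self hw
      have hws : w = v := le_antisymm (hdom w hwH2 v hvP) (hsmin w hwY)
      subst hws
      have hwp : 1 ≤ ((e ::ₘ Y0) - P).count w := Multiset.count_pos.mpr hw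
      rw [Multiset.count_sub] at hwp
      omega
  · simp only [Multiset.count_add, Multiset.count_singleton, if_neg hvs]
    have := step1c v
    omega

-- ---- facts about one round of the two loops ----

theorem foldl_min_eq_self {x : Int} {xs : List Int} (h : ∀ y ∈ xs, x ≤ y) :
    xs.foldl min x = x := by
  refine le_antisymm (foldl_min_le xs x).1 ?_
  rcases List.mem_cons.mp (foldl_min_mem x xs) with hm | hm
  · omega
  · exact h _ hm

theorem min_append_dominated (e : Int) (R h2 : List Int) (hne : h2 ≠ [])
    (hdom : ∀ x ∈ h2, ∀ y ∈ R, x ≤ y) :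
    (R ++ h2).foldl min e = h2.foldl min e := by
  obtain ⟨h0, hh0⟩ := List.exists_mem_of_ne_nil h2 hne
  apply le_antisymm
  · rcases List.mem_cons.mp (foldl_min_mem e h2) with hm | hm
    · rw [hm]; exact (foldl_min_le (R ++ h2) e).1
    · exact foldl_min_le_of_mem (List.mem_cons_of_mem _ (List.mem_append_right _ hm))
  · rcases List.mem_cons.mp (foldl_min_mem e (R ++ h2)) with hm | hm
    · rw [hm]; exact (foldl_min_le h2 e).1
    · rcases List.mem_append.mp hm with hm | hm
      · calc h2.foldl min e ≤ h0 := (foldl_min_le h2 e).2 h0 hh0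
          _ ≤ (R ++ h2).foldl min e := hdom h0 hh0 _ hm
      · exact (foldl_min_le h2 e).2 _ hm

theorem pop_cases (P H' h2p : List Int) (e : Int)
    (hperm : (P ++ H').Perm (e :: h2p)) (hP : P ≠ []) :
    (∃ p ∈ P, p ∈ h2p) ∨ (P = [e] ∧ e ∉ h2p) := by
  by_cases hex : ∃ p ∈ P, p ∈ h2p
  · exact Or.inl hex
  · push Not at hex
    have hPe : ∀ p ∈ P, p = e := by
      intro p hp
      have hmem : p ∈ e :: h2p := hperm.mem_iff.mp (List.mem_append_left _ hp)
      rcases List.mem_cons.mp hmem with h | h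
      · exact h
      · exact absurd h (hex p hp)
    by_cases het : e ∈ h2p
    · obtain ⟨p, hp⟩ := List.exists_mem_of_ne_nil P hP
      exact absurd ((hPe p hp) ▸ het) (hex p hp)
    · refine Or.inr ⟨?_, het⟩
      have hc := hperm.count_eq e
      rw [List.count_append, List.count_cons_self] at hc
      have hct : h2p.count e = 0 := List.count_eq_zero.mpr het
      have hPcount : P.count e = P.length := List.count_eq_length.mpr (fun b hb => (hPe b hb).symm)
      have hlen1 : P.length = 1 := by
        have h1 : 1 ≤ P.length := List.length_pos_iff.mpr hP
        omega
      obtain ⟨a, ha⟩ := List.length_eq_one_iff.mp hlen1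
      subst ha
      rw [hPe a (by simp)]

theorem not_both (P H' h2p : List Int) (e : Int)
    (hperm : (P ++ H').Perm (e :: h2p)) (hPe : P = [e]) (hnot : e ∉ h2p)
    (heH : e ∈ H') : False := by
  have hc := hperm.count_eq e
  rw [List.count_append, List.count_cons_self] at hc
  have hct : h2p.count e = 0 := List.count_eq_zero.mpr hnot
  have h1 : P.count e = 1 := by rw [hPe]; simp
  have h2 : 1 ≤ H'.count e := List.count_pos_iff.mpr heH
  omega

theorem aux_e_le (P H' h2p : List Int) (e y nA : Int)
    (hperm : (P ++ H').Perm (e :: h2p))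
    (hdomPH : ∀ x ∈ H', ∀ p ∈ P, x ≤ p)
    (heH : e ∈ H')
    (hne : nA - e < 0 → P ≠ [])
    (hdomy : ∀ p ∈ h2p, p ≤ y)
    (hy : nA < y) : e ≤ y := by
  by_cases hneg : nA - e < 0
  · rcases pop_cases P H' h2p e hperm (hne hneg) with ⟨p, hp, hph⟩ | ⟨hPe, hnot⟩
    · exact le_trans (hdomPH e heH p hp) (hdomy p hph)
    · exact (not_both P H' h2p e hperm hPe hnot heH).elim
  · omega

theorem aux_nA_lt (P H' h2p : List Int) (e y nA : Int)
    (hperm : (P ++ H').Perm (e :: h2p))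
    (hlt : ∀ p ∈ P, nA - e + P.sum < p)
    (hdomy : ∀ p ∈ h2p, p ≤ y)
    (he : 0 ≤ e)
    (hy : nA < y) : nA - e + P.sum < y := by
  rcases eq_or_ne P ([] : List Int) with rfl | hP
  · simp; omega
  · rcases pop_cases P H' h2p e hperm hP with ⟨p, hp, hph⟩ | ⟨hPe, _⟩
    · exact lt_of_lt_of_le (hlt p hp) (hdomy p hph)
    · rw [hPe]; simp; omega

-- ---- the joint simulation invariant ----

theorem main_loop (k0 : Int) : ∀ (rest R h2 paid : List Int) (nA k ans : Int),
    (∀ e ∈ rest, 0 ≤ e) →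
    (∀ x ∈ R, 0 ≤ x) → (∀ x ∈ h2, 0 ≤ x) → (∀ x ∈ paid, 0 ≤ x) →
    0 ≤ nA → 0 ≤ k →
    k + (R.length : Int) = k0 →
    ((paid = [] ∧ ((R.length : Int) + h2.length < k0)) ∨ (h2.length : Int) = k) →
    (∀ x ∈ h2, ∀ y ∈ R, x ≤ y) →
    (∀ x ∈ paid, ∀ y ∈ R, x ≤ y) →
    (∀ x ∈ paid, ∀ y ∈ h2, x ≤ y) →
    (∀ y ∈ R, nA < y) →
    aloop nA k (h2 ++ paid) ans rest = bloop (nA + h2.sum) k0 (R ++ h2) ans rest := by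
  intro rest
  induction rest with
  | nil =>
    intro R h2 paid nA k ans _ _ _ _ _ _ _ _ _ _ _ _
    rfl
  | cons e rest ih =>
    intro R h2 paid nA k ans hrest hRnn hh2nn hpaidnn hnA hk hV3 hV4 hV5 hV6a hV6b hV7
    have he : 0 ≤ e := hrest e (by simp)
    have hrest' : ∀ x ∈ rest, 0 ≤ x := fun x hx => hrest x (by simp [hx])
    simp only [aloop, bloop]
    by_cases hkz : k ≤ 0
    · -- k = 0 : A refunds nothing; B's heap is exactly R and always pops
      have hk0 : k = 0 := le_antisymm hkz hk
      have hh2nil : h2 = [] := by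
        rcases hV4 with ⟨_, hlt⟩ | hlen
        · exfalso; omega
        · exact List.length_eq_zero_iff.mp (by omega)
      subst hh2nil hk0
      rw [List.append_nil]
      simp only [List.sum_nil, add_zero]
      have hcondB : k0 < ((e :: R).length : Int) := by
        simp only [List.length_cons]; push_cast; omega
      rw [if_pos hcondB]
      by_cases hbrk : nA - e < 0
      · -- A breaks; B pays min(e :: R) and fails
        rw [if_pos ⟨hbrk, le_refl (0 : Int)⟩]
        have hsfail : nA - (popLeast e R).1 < 0 := by
          rcases List.mem_cons.mp (foldl_min_mem e R) with hm | hm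
          · simp only [popLeast]; omega
          · have := hV7 _ hm
            simp only [popLeast]; omega
        rw [if_pos hsfail]
      · -- both survive; B pays exactly e
        rw [if_neg (by intro hco; exact hbrk hco.1)]
        have hseq' : R.foldl min e = e :=
          foldl_min_eq_self (fun y hy => by have := hV7 y hy; omega)
        have hseq : (popLeast e R).1 = e := by simp only [popLeast]; exact hseq'
        have htail : (popLeast e R).2 = R := by
          simp only [popLeast]
          rw [hseq']
          simp
        rw [hseq, htail]
        rw [if_neg hbrk]
        simp only [List.nil_append]
        have hrefund : refund (nA - e) 0 (e :: paid) = (nA - e, 0, e :: paid) :=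
          refund_cons_neg _ _ (by intro hco; omega)
        rw [hrefund]
        have := ih R [] (e :: paid) (nA - e) 0 (ans + 1) hrest' hRnn (by simp)
          (fun x hx => by rcases List.mem_cons.mp hx with rfl | hx2; exacts [he, hpaidnn x hx2])
          (by omega) le_rfl (by omega) (Or.inr (by simp))
          (by simp) (by
            intro x hx y hy
            rcases List.mem_cons.mp hx with rfl | hx
            · exact le_trans (by omega) (le_of_lt (hV7 y hy))
            · exact hV6a x hx y hy)
          (by simp) (fun y hy => by have := hV7 y hy; omega)
        simpa using this
    · -- 0 < k : A never breaks this round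
      have hkpos : 0 < k := by omega
      rw [if_neg (by intro hco; omega)]
      obtain ⟨P, H', heq, hperm, hdom, hlt, hlen, hzero, hne, hbound⟩ :=
        refund_spec (e :: (h2 ++ paid)) (nA - e) k hk
      have hlnn : ∀ x ∈ e :: (h2 ++ paid), 0 ≤ x := by
        intro x hx
        rcases List.mem_cons.mp hx with rfl | hx
        · exact he
        · rcases List.mem_append.mp hx with hx | hx
          · exact hh2nn x hx
          · exact hpaidnn x hx
      have hPl : ∀ p ∈ P, p ∈ e :: (h2 ++ paid) :=
        fun p hp => hperm.mem_iff.mp (List.mem_append_left _ hp)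
      have hH'l : ∀ x ∈ H', x ∈ e :: (h2 ++ paid) :=
        fun x hx => hperm.mem_iff.mp (List.mem_append_right _ hx)
      have hPnn : ∀ p ∈ P, 0 ≤ p := fun p hp => hlnn p (hPl p hp)
      have hH'nn : ∀ x ∈ H', 0 ≤ x := fun x hx => hlnn x (hH'l x hx)
      have hnA'' : 0 ≤ nA - e + P.sum := by
        by_cases hneg : nA - e < 0
        · have hPne := hne (by simp) hneg hkpos
          have := hbound hlnn hPne e (by simp)
          omega
        · have h0 := hzero (by omega)
          rw [h0.1]
          simp; omega
      have hlensum : P.length + H'.length = 1 + (h2.length + paid.length) := by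
        have := hperm.length_eq
        simp only [List.length_append, List.length_cons] at this
        omega
      have hsums : P.sum + H'.sum = e + (h2.sum + paid.sum) := by
        have := hperm.sum_eq
        simp only [List.sum_append, List.sum_cons] at this
        omega
      rw [heq]
      by_cases hpop : k0 < ((e :: (R ++ h2)).length : Int)
      · -- B pops : h2 has exactly k elements
        have hh2k : (h2.length : Int) = k := by
          rcases hV4 with ⟨_, hsm⟩ | hl
          · exfalso
            simp only [List.length_cons, List.length_append] at hpop
            push_cast at hpop
            omega
          · exact hl
        have hh2ne : h2 ≠ [] := by
          intro h0
          rw [h0] at hh2k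
          simp at hh2k
          omega
        rw [if_pos hpop]
        have hsval : (popLeast e (R ++ h2)).1 = h2.foldl min e := by
          simp only [popLeast]
          rw [min_append_dominated e R h2 hh2ne hV5]
        set s := h2.foldl min e with hsdef
        have hsmem : s ∈ e :: h2 := foldl_min_mem e h2
        have hsmin : ∀ y ∈ e :: h2, s ≤ y := fun y hy => foldl_min_le_of_mem hy
        -- multiset bookkeeping
        have heqM : (↑paid : Multiset Int) + (e ::ₘ (↑h2 : Multiset Int)) =
            (↑P : Multiset Int) + (↑H' : Multiset Int) := by
          have hcoe : (↑P : Multiset Int) + (↑H' : Multiset Int) =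
              e ::ₘ ((↑h2 : Multiset Int) + (↑paid : Multiset Int)) := by
            rw [Multiset.coe_add]
            rw [show e ::ₘ ((↑h2 : Multiset Int) + (↑paid : Multiset Int)) =
              (↑(e :: (h2 ++ paid)) : Multiset Int) by rw [Multiset.coe_add, Multiset.cons_coe]]
            exact Multiset.coe_eq_coe.mpr hperm
          rw [hcoe, ← Multiset.singleton_add, ← Multiset.singleton_add]
          abel
        have hcore : (↑P : Multiset Int) + {s} ≤ e ::ₘ (↑h2 : Multiset Int) := by
          apply core_step (↑paid) (↑h2) (↑P) (↑H') e s heqM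
          · intro x hx y hy
            exact hV6b x (Multiset.mem_coe.mp hx) y (Multiset.mem_coe.mp hy)
          · intro x hx y hy
            exact hdom x (Multiset.mem_coe.mp hx) y (Multiset.mem_coe.mp hy)
          · simp only [Multiset.coe_card]
            omega
          · rw [Multiset.cons_coe]
            exact Multiset.mem_coe.mpr hsmem
          · intro y hy
            rw [Multiset.cons_coe] at hy
            exact hsmin y (Multiset.mem_coe.mp hy)
        set rem : Multiset Int := (e ::ₘ (↑h2 : Multiset Int)) - ((↑P : Multiset Int) + {s}) with hremdef
        have hkey : (↑P : Multiset Int) + {s} + rem = e ::ₘ (↑h2 : Multiset Int) :=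
          add_tsub_cancel_of_le hcore
        set h2' := rem.toList with hh2'def
        have hh2'coe : (↑h2' : Multiset Int) = rem := Multiset.coe_toList rem
        have hremmem : ∀ x ∈ h2', x = e ∨ x ∈ h2 := by
          intro x hx
          have hx1 : x ∈ rem := by rw [← hh2'coe]; exact Multiset.mem_coe.mpr hx
          have hx2 : x ∈ e ::ₘ (↑h2 : Multiset Int) := Multiset.mem_of_le tsub_le_self hx1
          rcases Multiset.mem_cons.mp hx2 with h | h
          · exact Or.inl h
          · exact Or.inr (Multiset.mem_coe.mp h)
        have hh2'nn : ∀ x ∈ h2', 0 ≤ x := by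
          intro x hx
          rcases hremmem x hx with rfl | hx2
          · exact he
          · exact hh2nn x hx2
        have hH'M : (↑H' : Multiset Int) = (↑paid : Multiset Int) + {s} + rem := by
          have h1 : (↑P : Multiset Int) + (↑H' : Multiset Int) =
              (↑P : Multiset Int) + ((↑paid : Multiset Int) + {s} + rem) := by
            rw [← heqM, ← hkey]
            abel
          exact add_left_cancel h1
        have hsumkey : P.sum + s + rem.sum = e + h2.sum := by
          have := congrArg Multiset.sum hkey
          simp only [Multiset.sum_add, Multiset.sum_coe, Multiset.sum_singleton,
            Multiset.sum_cons] at this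
          omega
        have hcardkey : P.length + 1 + rem.card = 1 + h2.length := by
          have := congrArg Multiset.card hkey
          simp only [Multiset.card_add, Multiset.coe_card, Multiset.card_singleton,
            Multiset.card_cons] at this
          omega
        have hh2'len : (h2'.length : Int) = k - P.length := by
          have : h2'.length = rem.card := by rw [← hh2'coe, Multiset.coe_card]
          push_cast [this]
          omega
        have hsH' : s ∈ H' := by
          rw [← Multiset.mem_coe, hH'M]
          refine Multiset.mem_of_le (Multiset.le_add_right _ _) ?_
          exact Multiset.mem_of_le (Multiset.le_add_left _ _) (by simp)
        have hpaidH' : ∀ x ∈ paid, x ∈ H' := by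
          intro x hx
          rw [← Multiset.mem_coe, hH'M]
          exact Multiset.mem_of_le ((Multiset.le_add_right _ _).trans (Multiset.le_add_right _ _))
            (Multiset.mem_coe.mpr hx)
        have hremH' : ∀ x ∈ h2', x ∈ H' := by
          intro x hx
          rw [← Multiset.mem_coe, hH'M]
          exact Multiset.mem_of_le (Multiset.le_add_left _ _) (by rw [← hh2'coe] at *; exact Multiset.mem_coe.mpr hx)
        have hPY : ∀ p ∈ P, p ∈ e :: h2 := by
          intro p hp
          have : p ∈ (↑P : Multiset Int) + {s} := Multiset.mem_of_le (Multiset.le_add_right _ _) (Multiset.mem_coe.mpr hp)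
          have := Multiset.mem_of_le hcore this
          rcases Multiset.mem_cons.mp this with h | h
          · simp [h]
          · simp [Multiset.mem_coe.mp h]
        -- B's payment keeps it solvent
        have hnb : ¬ (nA + h2.sum - (popLeast e (R ++ h2)).1 < 0) := by
          rw [hsval]
          have hremnn : 0 ≤ rem.sum := by
            rw [← hh2'coe, Multiset.sum_coe]
            exact List.sum_nonneg hh2'nn
          omega
        rw [if_neg hnb]
        -- switch both heaps to canonical form and recurse
        have hAheap : H'.Perm (h2' ++ (paid ++ [s])) := by
          rw [← Multiset.coe_eq_coe, hH'M]
          have h1 : (↑(h2' ++ (paid ++ [s])) : Multiset Int) =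
              rem + ((↑paid : Multiset Int) + {s}) := by
            simp only [← Multiset.coe_add, hh2'coe, Multiset.coe_singleton]
          rw [h1]
          abel
        have hBheap : ((popLeast e (R ++ h2)).2).Perm ((R ++ P) ++ h2') := by
          simp only [popLeast]
          rw [min_append_dominated e R h2 hh2ne hV5, ← hsdef]
          rw [← Multiset.coe_eq_coe, ← Multiset.coe_erase, ← Multiset.sub_singleton]
          have hX : (↑(e :: (R ++ h2)) : Multiset Int) =
              ((↑R : Multiset Int) + (↑P : Multiset Int) + rem) + {s} := by
            have h2X : (↑(e :: (R ++ h2)) : Multiset Int) =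
                (↑R : Multiset Int) + (e ::ₘ (↑h2 : Multiset Int)) := by
              rw [Multiset.cons_coe, Multiset.coe_add, Multiset.coe_eq_coe]
              exact List.perm_middle.symm
            rw [h2X, ← hkey]
            abel
          rw [hX, add_tsub_cancel_right]
          simp only [← Multiset.coe_add, hh2'coe]
        rw [aloop_perm rest _ _ _ hAheap, bloop_perm rest _ _ _ hBheap]
        have harg : nA + h2.sum - s = (nA - e + P.sum) + h2'.sum := by
          have : h2'.sum = rem.sum := by rw [← hh2'coe, Multiset.sum_coe]
          omega
        rw [hsval, harg]
        -- the inductive step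
        apply ih (R ++ P) h2' (paid ++ [s]) (nA - e + P.sum) (k - P.length) (ans + 1) hrest'
        · intro x hx
          rcases List.mem_append.mp hx with hx | hx
          · exact hRnn x hx
          · exact hPnn x hx
        · exact hh2'nn
        · intro x hx
          rcases List.mem_append.mp hx with hx | hx
          · exact hpaidnn x hx
          · rcases List.mem_singleton.mp hx with rfl
            rcases List.mem_cons.mp hsmem with h | h
            · rw [h] at *; exact he
            · exact hh2nn _ h
        · exact hnA''
        · omega
        · simp only [List.length_append]; push_cast; omega
        · right; exact hh2'len
        · -- V5 : new surplus dominated by refunded ∪ pops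
          intro x hx y hy
          have hxH' : x ∈ H' := hremH' x hx
          rcases List.mem_append.mp hy with hy | hy
          · -- y ∈ R
            rcases List.mem_cons.mp (hH'l x hxH') with rfl | hx2
            · exact aux_e_le P H' (h2 ++ paid) x y nA hperm (fun a ha p hp => hdom a ha p hp) hxH'
                (fun hneg => hne (by simp) hneg hkpos)
                (fun p hp => by
                  rcases List.mem_append.mp hp with hp | hp
                  · exact hV5 p hp y hy
                  · exact hV6a p hp y hy)
                (hV7 y hy)
            · rcases List.mem_append.mp hx2 with hx2 | hx2
              · exact hV5 x hx2 y hy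
              · exact hV6a x hx2 y hy
          · exact hdom x hxH' y hy
        · -- V6a : paid ∪ {s} below refunded ∪ pops
          intro x hx y hy
          rcases List.mem_append.mp hx with hx | hx
          · rcases List.mem_append.mp hy with hy | hy
            · exact hV6a x hx y hy
            · exact hdom x (hpaidH' x hx) y hy
          · rcases List.mem_singleton.mp hx with rfl
            rcases List.mem_append.mp hy with hy | hy
            · obtain ⟨h0, hh0⟩ := List.exists_mem_of_ne_nil h2 hh2ne
              exact le_trans (hsmin h0 (List.mem_cons_of_mem _ hh0)) (hV5 h0 hh0 y hy)
            · exact hsmin y (hPY y hy)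
        · -- V6b : paid ∪ {s} below the new surplus
          intro x hx y hy
          rcases List.mem_append.mp hx with hx | hx
          · rcases hremmem y hy with hye | hy2
            · -- y = e kept in the surplus
              rw [hye]
              by_cases he2 : e ∈ h2
              · exact hV6b x hx e he2
              · -- then s ∈ h2 and x ≤ s ≤ e
                have hsne : s ≠ e := by
                  intro hse
                  have hcnt := congrArg (Multiset.count e) hkey
                  simp only [Multiset.count_add] at hcnt
                  have h1 : Multiset.count e ({s} : Multiset Int) = 1 := by
                    rw [hse]; simp
                  have h2e : Multiset.count e (e ::ₘ (↑h2 : Multiset Int)) = 1 := by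
                    rw [Multiset.count_cons_self]
                    have : Multiset.count e (↑h2 : Multiset Int) = 0 := by
                      rw [Multiset.count_eq_zero]
                      exact fun hc => he2 (Multiset.mem_coe.mp hc)
                    omega
                  have h3 : 0 < Multiset.count e rem := by
                    have hmem' : e ∈ (↑h2' : Multiset Int) := Multiset.mem_coe.mpr (hye ▸ hy)
                    rw [hh2'coe] at hmem'
                    exact Multiset.count_pos.mpr hmem'
                  omega
                have hsh2 : s ∈ h2 := by
                  rcases List.mem_cons.mp hsmem with h | h
                  · exact absurd h hsne
                  · exact h
                exact le_trans (hV6b x hx s hsh2) (hsmin e (by simp))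
            · exact hV6b x hx y hy2
          · rcases List.mem_singleton.mp hx with rfl
            rcases hremmem y hy with hye | hy2
            · exact hsmin y (by simp [hye])
            · exact hsmin y (List.mem_cons_of_mem _ hy2)
        · -- V7
          intro y hy
          rcases List.mem_append.mp hy with hy | hy
          · exact aux_nA_lt P H' (h2 ++ paid) e y nA hperm hlt
              (fun p hp => by
                rcases List.mem_append.mp hp with hp | hp
                · exact hV5 p hp y hy
                · exact hV6a p hp y hy)
              he (hV7 y hy)
          · exact hlt y hy
      · -- B keeps everything : paid is empty and the whole prefix is in its heap
        obtain ⟨hpnil, hsmall⟩ : paid = [] ∧ ((R.length : Int) + h2.length < k0) := by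
          rcases hV4 with h | hl
          · exact h
          · exfalso
            apply hpop
            simp only [List.length_cons, List.length_append]
            push_cast
            omega
        subst hpnil
        rw [if_neg hpop]
        simp only [List.append_nil, List.sum_nil, List.length_nil, add_zero] at hperm hlensum hsums hlnn hH'l hPl
        have hAperm : H'.Perm (H' ++ []) := by simp
        rw [aloop_perm rest _ _ _ hAperm]
        have hBperm : (e :: (R ++ h2)).Perm ((R ++ P) ++ H') := by
          have h1 : (e :: (R ++ h2)).Perm (R ++ (e :: h2)) := List.perm_middle.symm
          have h2p : (R ++ (e :: h2)).Perm (R ++ (P ++ H')) := (hperm.symm).append_left R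
          have h3 : (R ++ (P ++ H')).Perm ((R ++ P) ++ H') := by rw [List.append_assoc]
          exact (h1.trans h2p).trans h3
        rw [bloop_perm rest _ _ _ hBperm]
        have harg : nA + h2.sum = (nA - e + P.sum) + H'.sum := by omega
        rw [harg]
        apply ih (R ++ P) H' [] (nA - e + P.sum) (k - P.length) (ans + 1) hrest'
        · intro x hx
          rcases List.mem_append.mp hx with hx | hx
          · exact hRnn x hx
          · exact hPnn x hx
        · exact hH'nn
        · simp
        · exact hnA''
        · omega
        · simp only [List.length_append]; push_cast; omega
        · by_cases hc2 : ((R ++ P).length : Int) + H'.length < k0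
          · exact Or.inl ⟨rfl, hc2⟩
          · right
            simp only [List.length_append] at hc2 ⊢
            push_cast at *
            omega
        · intro x hx y hy
          rcases List.mem_append.mp hy with hy | hy
          · rcases List.mem_cons.mp (hH'l x hx) with rfl | hx2
            · exact aux_e_le P H' h2 x y nA hperm (fun a ha p hp => hdom a ha p hp) hx
                (fun hneg => hne (by simp) hneg hkpos)
                (fun p hp => hV5 p hp y hy)
                (hV7 y hy)
            · exact hV5 x hx2 y hy
          · exact hdom x hx y hy
        · simp
        · simp
        · intro y hy
          rcases List.mem_append.mp hy with hy | hy
          · exact aux_nA_lt P H' h2 e y nA hperm hlt (fun p hp => hV5 p hp y hy) he (hV7 y hy)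
          · exact hlt y hy

-- ===== VERDICT (by name: the statement is the Claim_ definition above) =====
-- the regime k ≤ 0 : A never refunds, B pays every wave in full
theorem loop_k_nonpos (rest : List Int) : ∀ (hA : List Int) (n k ans : Int), k ≤ 0 →
    aloop n k hA ans rest = bloop n k [] ans rest := by
  induction rest with
  | nil => intro hA n k ans hk; rfl
  | cons e rest ih =>
    intro hA n k ans hk
    simp only [aloop, bloop]
    have hcond : k < (([e] : List Int).length : Int) := by simp; omega
    rw [if_pos hcond]
    have hpop1 : (popLeast e []).1 = e := by simp [popLeast]
    have hpop2 : (popLeast e []).2 = [] := by simp [popLeast]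
    rw [hpop1, hpop2]
    by_cases hbrk : n - e < 0
    · rw [if_pos ⟨hbrk, hk⟩, if_pos hbrk]
    · rw [if_neg (fun hco => hbrk hco.1), if_neg hbrk]
      have hrefund : refund (n - e) k (e :: hA) = (n - e, k, e :: hA) :=
        refund_cons_neg _ _ (by intro hco; omega)
      rw [hrefund]
      exact ih (e :: hA) (n - e) k (ans + 1) hk

-- the regime n < 0, 0 ≤ k : A refunds every wave until k runs out; B pays nothing until
-- its heap exceeds k and then the first payment is fatal
theorem loop_neg (k0 : Int) (rest : List Int) : ∀ (h : List Int) (nA k ans : Int),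
    (∀ x ∈ rest, 0 ≤ x) → (∀ x ∈ h, 0 ≤ x) → nA < 0 → 0 ≤ k →
    k + (h.length : Int) = k0 →
    aloop nA k [] ans rest = bloop nA k0 h ans rest := by
  induction rest with
  | nil => intro h nA k ans _ _ _ _ _; rfl
  | cons e rest ih =>
    intro h nA k ans hrest hhnn hnA hk hlen
    have he : 0 ≤ e := hrest e (by simp)
    simp only [aloop, bloop]
    by_cases hkz : k ≤ 0
    · -- both stop here
      have hcond : k0 < ((e :: h).length : Int) := by
        simp only [List.length_cons]; push_cast; omega
      rw [if_pos ⟨by omega, hkz⟩, if_pos hcond]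
      have hsnn : 0 ≤ (popLeast e h).1 := by
        rcases List.mem_cons.mp (foldl_min_mem e h) with hm | hm
        · simp only [popLeast]; omega
        · have := hhnn _ hm; simp only [popLeast]; omega
      rw [if_pos (by omega)]
    · -- A refunds e straight back, B just keeps e
      have hcond : ¬ k0 < ((e :: h).length : Int) := by
        simp only [List.length_cons]; push_cast; omega
      rw [if_neg (fun hco => hkz hco.2), if_neg hcond]
      have hrefund : refund (nA - e) k [e] = (nA - e + e, k - 1, []) := by
        rw [refund_cons_pos e [] ⟨by omega, by omega⟩]
        simp only [popGreatest, List.foldl_nil, List.erase_cons_head]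
        exact refund_nil _ _
      rw [hrefund]
      have harg : nA - e + e = nA := by omega
      rw [harg]
      exact ih (e :: h) nA (k - 1) (ans + 1)
        (fun x hx => hrest x (List.mem_cons_of_mem _ hx))
        (fun x hx => by rcases List.mem_cons.mp hx with rfl | hx2; exacts [he, hhnn x hx2])
        hnA (by omega) (by simp only [List.length_cons]; push_cast; omega)

theorem solution_spec : Claim_equal_solution := by
  intro n k enemy _ hpre
  unfold Spec_solution solution solution_alt
  by_cases hg : (enemy.length : Int) ≤ k ∨ enemy.sum ≤ n
  · rw [if_pos hg, if_pos hg]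
  · rw [if_neg hg, if_neg hg]
    by_cases hk : k ≤ 0
    · exact loop_k_nonpos enemy [] n k 0 hk
    · have henemy : ∀ e ∈ enemy, 0 ≤ e := by
        rcases hpre with h | h | h | h
        · exact h
        · exact absurd h hk
        · exact absurd (Or.inl h) hg
        · exact absurd (Or.inr h) hg
      by_cases hn : n < 0
      · exact loop_neg k enemy [] n k 0 henemy (by simp) hn (by omega) (by simp)
      · have h := main_loop k enemy [] [] [] n k 0 henemy (by simp) (by simp) (by simp)
          (by omega) (by omega) (by simp) (by simp; omega) (by simp) (by simp) (by simp) (by simp)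
        simpa using h
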